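-- pv_equiv track=rewrite | github.com/DiandreMiller/pythonDSA | index.py | getHighestRightWardNumber
-- ===== SOURCE A (Python) =====
-- from typing import List
--
-- def getHighestRightWardNumber (numberArray: List[int]) -> List[int]:
--
--     LARGEST_RIGHT_NUMBER = []
--     smallest_number = float('-inf')
--
--     for i in numberArray[::-1]:
--         if i > smallest_number:
--             smallest_number = i
--             LARGEST_RIGHT_NUMBER.append(i)
--
--
--     return LARGEST_RIGHT_NUMBER[::-1]
-- ===== SOURCE B (Python) =====
-- from typing import List
--
-- def getHighestRightWardNumber(numberArray: List[int]) -> List[int]: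
--     # Forward monotonic stack: an element survives iff nothing to its right
--     # is >= it, so each new x pops every candidate <= x before being pushed.
--     stack = []
--     for x in numberArray:
--         while stack and stack[-1] <= x:
--             stack.pop()
--         stack.append(x)
--     return stack
-- ===== Notes on version B (the rewrite author's own statement) =====
-- stated objective: alternative
-- what changed: Replaces A's right-to-left running-max scan plus final reversal with a forward monotonic-stack algorithm: each element pops previously kept candidates that are <= it and is pushed; the stack at the end is the answer in natural order.
import Mathlib
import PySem

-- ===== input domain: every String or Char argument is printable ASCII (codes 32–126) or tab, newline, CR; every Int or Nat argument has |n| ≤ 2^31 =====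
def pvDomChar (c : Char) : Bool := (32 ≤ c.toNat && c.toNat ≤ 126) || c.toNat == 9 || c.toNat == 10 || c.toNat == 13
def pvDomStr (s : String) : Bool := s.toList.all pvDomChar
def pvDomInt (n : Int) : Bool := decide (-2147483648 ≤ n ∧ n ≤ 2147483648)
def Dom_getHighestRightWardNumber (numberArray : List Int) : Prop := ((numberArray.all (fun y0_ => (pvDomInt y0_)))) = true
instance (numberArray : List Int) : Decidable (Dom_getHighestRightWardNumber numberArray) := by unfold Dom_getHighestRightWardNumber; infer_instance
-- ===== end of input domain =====

-- B replaces the reverse running-max scan with a forward monotonic-stack algorithm; same return value.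

-- ===== PORT A =====
-- A: reverse scan keeping the running strict max (float('-inf') modelled as `none`),
-- appending each new maximum, then reversing the collected list.
def pvStepA (st : Option Int × List Int) (i : Int) : Option Int × List Int :=
  match st.1 with
  | none => (some i, st.2 ++ [i])
  | some m => if i > m then (some i, st.2 ++ [i]) else st

def getHighestRightWardNumber (numberArray : List Int) : List Int :=
  (((PySem.List.slice? numberArray none none (-1)).getD []).foldl pvStepA (none, ([] : List Int))).2.reverse

-- ===== PORT B =====
-- B: forward pass over the list; the stack is held top-at-head (Python appends/pops
-- at the end), so the final answer is the stack reversed.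
-- the `while stack and stack[-1] <= x: stack.pop()` loop followed by `stack.append(x)`:
def pvPush (x : Int) : List Int → List Int
  | [] => [x]
  | t :: rest => if t ≤ x then pvPush x rest else x :: t :: rest

def getHighestRightWardNumber_alt (numberArray : List Int) : List Int :=
  (numberArray.foldl (fun st x => pvPush x st) []).reverse

-- ===== PRECONDITION & SPEC =====
def Spec_getHighestRightWardNumber (numberArray : List Int) (out : List Int) : Prop := out = getHighestRightWardNumber_alt numberArray
instance (numberArray : List Int) (out : List Int) : Decidable (Spec_getHighestRightWardNumber numberArray out) := by unfold Spec_getHighestRightWardNumber; infer_instance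

-- ===== CLAIM (what is proved, stated in full; the proofs are below) =====
def Claim_equal_getHighestRightWardNumber : Prop := ∀ (numberArray : List Int), Dom_getHighestRightWardNumber numberArray → Spec_getHighestRightWardNumber numberArray (getHighestRightWardNumber numberArray)

-- ===== LEMMAS AND PROOFS =====

-- Reference function: the "leaders" of xs in natural order, defined by recursion from the right.
def pvL : List Int → List Int
  | [] => []
  | x :: xs =>
    let r := pvL xs
    match r with
    | [] => [x]
    | y :: _ => if x > y then x :: r else r

-- xs[::-1] is xs.reverse
theorem pvSlice_rev (xs : List Int) :
    (PySem.List.slice? xs none none (-1)).getD [] = xs.reverse := by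
  rw [PySem.List.slice?_none_none_neg_one]; rfl

-- A's fold state after scanning xs.reverse: running max = head of pvL xs, list = (pvL xs).reverse.
theorem pvFoldA (xs : List Int) :
    xs.reverse.foldl pvStepA (none, ([] : List Int)) = ((pvL xs).head?, (pvL xs).reverse) := by
  induction xs with
  | nil => rfl
  | cons x t ih =>
    simp only [List.reverse_cons, List.foldl_append, List.foldl_cons, List.foldl_nil, ih]
    cases h : pvL t with
    | nil => simp [pvStepA, pvL, h]
    | cons y r =>
      simp only [pvL, h, pvStepA, List.head?]
      by_cases hx : x > y <;> simp [hx]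

theorem pvA_eq_L (xs : List Int) : getHighestRightWardNumber xs = pvL xs := by
  unfold getHighestRightWardNumber
  rw [pvSlice_rev, pvFoldA]
  simp

-- net effect of popping with bound m (pvPush without the final push)
def pvPopLE (m : Int) : List Int → List Int
  | [] => []
  | t :: r => if t ≤ m then pvPopLE m r else t :: r

theorem pvPush_eq (x : Int) (st : List Int) : pvPush x st = x :: pvPopLE x st := by
  induction st with
  | nil => rfl
  | cons t r ih =>
    simp only [pvPush, pvPopLE]
    by_cases h : t ≤ x <;> simp [h, ih]

theorem pvPopLE_popLE {x m : Int} (hxm : x ≤ m) (st : List Int) :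
    pvPopLE m (pvPopLE x st) = pvPopLE m st := by
  induction st with
  | nil => rfl
  | cons t r ih =>
    simp only [pvPopLE]
    by_cases h : t ≤ x
    · have : t ≤ m := le_trans h hxm
      simp [h, this, ih]
    · simp [pvPopLE, h]

-- Invariant of B's fold: processing xs on stack st pushes the reversed leaders of xs
-- and pops st down by the maximum of xs (the head of pvL xs).
theorem pvFoldB (xs : List Int) (st : List Int) :
    xs.foldl (fun s x => pvPush x s) st =
      (pvL xs).reverse ++ (match (pvL xs).head? with
                           | none => st
                           | some m => pvPopLE m st) := by
  induction xs generalizing st with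
  | nil => rfl
  | cons x t ih =>
    rw [List.foldl_cons, ih (pvPush x st), pvPush_eq x st]
    cases h : pvL t with
    | nil => simp [pvL, h]
    | cons y r =>
      simp only [pvL, h, List.head?]
      by_cases hx : x > y
      · have hxy : ¬ x ≤ y := not_le.mpr hx
        simp [hx, pvPopLE, hxy]
      · have hxy : x ≤ y := not_lt.mp hx
        simp [hx, pvPopLE, hxy, pvPopLE_popLE hxy st]

theorem pvB_eq_L (xs : List Int) : getHighestRightWardNumber_alt xs = pvL xs := by
  unfold getHighestRightWardNumber_alt
  rw [pvFoldB]
  cases h : (pvL xs).head? <;> simp [pvPopLE]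

-- ===== VERDICT (by name: the statement is the Claim_ definition above) =====
theorem getHighestRightWardNumber_spec : Claim_equal_getHighestRightWardNumber := by
  intro xs _
  unfold Spec_getHighestRightWardNumber
  rw [pvA_eq_L, pvB_eq_L]
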